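-- pv_equiv track=rewrite | github.com/w-digital-scanner/w13scan | W13SCAN/lib/helper/jscontext.py | skipSingleLineComment
-- ===== SOURCE A (Python) =====
-- LINE_TERMINATORS = {0x0A, 0x0D, 0x2028, 0x2029}
--
-- def isLineTerminator(ch):
--     return ch in LINE_TERMINATORS
--
-- def skipSingleLineComment(offset, index, length, source):
--     start = index - offset
--     while index < length:
--         ch = ord(source[index])
--         index += 1
--         if isLineTerminator(ch):
--             if (ch == 13 and ord(source[index]) == 10):
--                 index += 1
--             return {
--                 'type': 'Line',
--                 'value': source[start + offset:index - 1],
--             }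
--     return None
-- ===== SOURCE B (Python) =====
-- LINE_TERMINATOR_CHARS = "\n\r\u2028\u2029"
--
--
-- def skipSingleLineComment(offset, index, length, source):
--     seg = source[index:length]
--     hits = [p for p in (seg.find(t) for t in LINE_TERMINATOR_CHARS) if p != -1]
--     if not hits:
--         return None
--     pos = index + min(hits)
--     end = pos
--     if source[pos] == '\r' and pos + 1 < len(source) and source[pos + 1] == '\n':
--         end = pos + 1
--     return {'type': 'Line', 'value': source[index:end]}
-- ===== Notes on version B (the rewrite author's own statement) =====
-- stated objective: faster
-- what changed: Replaces A's per-character interpreted while-loop with four C-level str.find calls on the slice source[index:length], taking the minimum hit as the terminator position, then one bounds-checked CRLF lookahead and a single slice to build the value.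
-- outside the precondition, e.g. on skipSingleLineComment(0, -1, 2, 'a\nb'): A returns {'type': 'Line', 'value': ''}, B returns None; on skipSingleLineComment(0, 0, -1, 'a\nb'): A returns None, B returns {'type': 'Line', 'value': 'a'}
import Mathlib
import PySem

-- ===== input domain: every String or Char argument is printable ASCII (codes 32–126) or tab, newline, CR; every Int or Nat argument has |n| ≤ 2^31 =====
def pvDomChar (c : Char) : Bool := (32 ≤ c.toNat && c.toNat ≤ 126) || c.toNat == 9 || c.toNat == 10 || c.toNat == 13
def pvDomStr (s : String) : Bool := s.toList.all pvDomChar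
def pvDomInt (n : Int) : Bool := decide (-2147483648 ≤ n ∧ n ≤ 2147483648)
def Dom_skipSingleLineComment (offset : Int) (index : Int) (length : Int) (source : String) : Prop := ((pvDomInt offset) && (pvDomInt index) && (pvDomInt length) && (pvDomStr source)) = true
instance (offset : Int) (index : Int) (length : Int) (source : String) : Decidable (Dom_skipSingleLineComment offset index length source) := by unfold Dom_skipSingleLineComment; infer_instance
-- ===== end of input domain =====

-- B replaces A's per-character while-loop by bulk str.find searches for each line
-- terminator over source[index:length] (minimum hit = the terminator position), then one
-- CRLF lookahead and a single slice.
-- ===== PORT A =====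
-- LINE_TERMINATORS = {0x0A, 0x0D, 0x2028, 0x2029}
def LINE_TERMINATORS : PySem.Set Int := PySem.Set.ofList [0x0A, 0x0D, 0x2028, 0x2029]

-- def isLineTerminator(ch): return ch in LINE_TERMINATORS
def isLineTerminator (ch : Int) : Bool := PySem.Set.contains LINE_TERMINATORS ch

-- the while-loop of A, recursing on the remaining scan distance (length - index);
-- PySem.Str.pyGet? returns none exactly where Python's source[index] raises IndexError
def skipSingleLineCommentLoop (offset : Int) (start : Int) (length : Int) (source : String) (index : Int) : Option (List (String × String)) :=
  if _h : index < length then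
    match PySem.Str.pyGet? source index with
    | none => none                                   -- IndexError (excluded by Pre_)
    | some c =>
      let ch : Int := (c.toNat : Int)                -- ord(source[index]); exact for every code point
      let index1 := index + 1                        -- index += 1
      if isLineTerminator ch then
        if ch == 13 then
          match PySem.Str.pyGet? source index1 with  -- ord(source[index]) lookahead
          | none => none                             -- IndexError (excluded by Pre_)
          | some c2 =>
            if ((c2.toNat : Int) == 10) then
              let index2 := index1 + 1               -- index += 1
              some [("type", "Line"), ("value", PySem.Str.slice source (some (start + offset)) (some (index2 - 1)))]
            else
              some [("type", "Line"), ("value", PySem.Str.slice source (some (start + offset)) (some (index1 - 1)))]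
        else
          some [("type", "Line"), ("value", PySem.Str.slice source (some (start + offset)) (some (index1 - 1)))]
      else
        skipSingleLineCommentLoop offset start length source index1
  else none
termination_by (length - index).toNat
decreasing_by omega

def skipSingleLineComment (offset : Int) (index : Int) (length : Int) (source : String) : Option (List (String × String)) :=
  let start := index - offset
  skipSingleLineCommentLoop offset start length source index

-- ===== PORT B =====
-- LINE_TERMINATOR_CHARS = "\n\r\u2028\u2029" (iterated character by character)
def LINE_TERMINATOR_CHARS : List String := ["\n", "\r", "\u2028", "\u2029"]

def skipSingleLineComment_alt (offset : Int) (index : Int) (length : Int) (source : String) : Option (List (String × String)) :=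
  let seg := PySem.Str.slice source (some index) (some length)
  let hits := (LINE_TERMINATOR_CHARS.map (fun t => PySem.Str.find seg t)).filter (fun p => p ≠ -1)
  match PySem.List.min? hits (fun p => p) with     -- if not hits: return None / pos = index + min(hits)
  | none => none
  | some m =>
    let pos := index + m
    let endPos : Int :=
      if (PySem.Str.pyGet? source pos == some '\r')
          && decide (pos + 1 < (PySem.Str.len source : Int))
          && (PySem.Str.pyGet? source (pos + 1) == some '\n')
      then pos + 1 else pos
    some [("type", "Line"), ("value", PySem.Str.slice source (some index) (some endPos))]

-- ===== PRECONDITION & SPEC =====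
def pvIsTerm (c : Char) : Bool := c == '\n' || c == '\r' || c == '\u2028' || c == '\u2029'

-- Pre_ restricts to the scanner's natural call pattern: it excludes negative scan starts
-- (index < 0 with index < length) and a negative length whose wrapped slice is non-empty,
-- where A's value arises from Python's accidental negative-index wraparound, and the
-- inputs where A raises IndexError (scanning past the end of source, or the CRLF
-- lookahead at a terminating CR that ends the string).
def Pre_skipSingleLineComment (offset : Int) (index : Int) (length : Int) (source : String) : Prop :=
  let cs := source.toList
  let n := cs.length
  (length ≤ index ∧ PySem.List.clampIdx n length ≤ PySem.List.clampIdx n index)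
  ∨ (0 ≤ index ∧ index < length ∧
      ¬((n : Int) < length ∧ ∀ c ∈ cs.drop index.toNat, pvIsTerm c = false) ∧
      ¬((n : Int) ≤ length ∧ cs.getLast? = some '\r' ∧ ∀ c ∈ (cs.take (n - 1)).drop index.toNat, pvIsTerm c = false))
instance (offset : Int) (index : Int) (length : Int) (source : String) : Decidable (Pre_skipSingleLineComment offset index length source) := by unfold Pre_skipSingleLineComment; infer_instance

def pvWitness_skipSingleLineComment : Int × Int × Int × String := (0, 0, 5, "ab\ncd")

def Spec_skipSingleLineComment (offset : Int) (index : Int) (length : Int) (source : String) (out : Option (List (String × String))) : Prop := out = skipSingleLineComment_alt offset index length source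
instance (offset : Int) (index : Int) (length : Int) (source : String) (out : Option (List (String × String))) : Decidable (Spec_skipSingleLineComment offset index length source out) := by unfold Spec_skipSingleLineComment; infer_instance

-- ===== CLAIM (what is proved, stated in full; the proofs are below) =====
def Claim_equal_skipSingleLineComment : Prop := ∀ (offset : Int) (index : Int) (length : Int) (source : String), Dom_skipSingleLineComment offset index length source → Pre_skipSingleLineComment offset index length source → Spec_skipSingleLineComment offset index length source (skipSingleLineComment offset index length source)

-- ===== LEMMAS AND PROOFS =====

def TS : List Char := ['\n', '\r', '\u2028', '\u2029']

def hitsOf (s : List Char) : List Int := (TS.map (fun c => PySem.Chars.find s [c])).filter (fun p => p ≠ -1)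

def FirstTermAt (s : List Char) (p : Nat) : Prop :=
  (∃ c, s[p]? = some c ∧ pvIsTerm c = true) ∧ ∀ j, j < p → ∀ c, s[j]? = some c → pvIsTerm c = false

theorem char_eq_iff_toNat (c d : Char) : c = d ↔ c.toNat = d.toNat := by
  constructor
  · intro h; rw [h]
  · intro h
    have h1 := Char.ofNat_toNat c
    have h2 := Char.ofNat_toNat d
    rw [← h1, ← h2, h]

theorem pv_isTerm_bridge (c : Char) : isLineTerminator ((c.toNat : Int)) = pvIsTerm c := by
  by_cases h1 : c = '\n'; · subst h1; decide
  by_cases h2 : c = '\r'; · subst h2; decide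
  by_cases h3 : c = '\u2028'; · subst h3; decide
  by_cases h4 : c = '\u2029'; · subst h4; decide
  rw [char_eq_iff_toNat] at h1 h2 h3 h4
  simp [isLineTerminator, LINE_TERMINATORS, pvIsTerm, PySem.Set.contains_eq_listContains]
  have hh1 : c.toNat ≠ 10 := by simpa using h1
  have hh2 : c.toNat ≠ 13 := by simpa using h2
  have hh3 : c.toNat ≠ 8232 := by simpa using h3
  have hh4 : c.toNat ≠ 8233 := by simpa using h4
  have g1 : ((c.toNat : Int) = 10) = False := by simp; omega
  have g2 : ((c.toNat : Int) = 13) = False := by simp; omega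
  have g3 : ((c.toNat : Int) = 8232) = False := by simp; omega
  have g4 : ((c.toNat : Int) = 8233) = False := by simp; omega
  have b1 : (c == '\n') = false := by simp [char_eq_iff_toNat]; omega
  have b2 : (c == '\r') = false := by simp [char_eq_iff_toNat]; omega
  have b3 : (c == '\u2028') = false := by simp [char_eq_iff_toNat]; omega
  have b4 : (c == '\u2029') = false := by simp [char_eq_iff_toNat]; omega
  simp only [g1, g2, g3, g4, b1, b2, b3, b4, decide_false, Bool.or_self]

theorem singleton_prefix (c : Char) (l : List Char) : [c] <+: l ↔ l[0]? = some c := by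
  cases l with
  | nil => simp
  | cons x xs => simp [List.cons_prefix_cons, eq_comm]

theorem singleton_prefix_drop (c : Char) (s : List Char) (j : Nat) : [c] <+: s.drop j ↔ s[j]? = some c := by
  rw [singleton_prefix]
  simp [List.getElem?_drop]

theorem singleton_infix (c : Char) (s : List Char) : [c] <:+: s ↔ c ∈ s := by
  constructor
  · intro h; exact h.sublist.subset (by simp)
  · intro h
    obtain ⟨l, r, rfl⟩ := List.append_of_mem h
    exact ⟨l, r, by simp⟩

theorem find_not_mem (s : List Char) (c : Char) (h : c ∉ s) : PySem.Chars.find s [c] = -1 := by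
  rw [PySem.Chars.find_eq_neg_one_iff, singleton_infix]; exact h

theorem find_first (s : List Char) (c : Char) (p : Nat) (hp : s[p]? = some c)
    (hmin : ∀ j, j < p → s[j]? ≠ some c) : PySem.Chars.find s [c] = (p : Int) := by
  have hmem : c ∈ s := List.mem_of_getElem? hp
  have h0 : 0 ≤ PySem.Chars.find s [c] := by
    rw [PySem.Chars.find_nonneg_iff, singleton_infix]; exact hmem
  obtain ⟨hpre, hlt⟩ := PySem.Chars.find_spec (s := s) (sub := [c]) h0
  rw [singleton_prefix_drop] at hpre
  have ht : (PySem.Chars.find s [c]).toNat = p := by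
    rcases Nat.lt_trichotomy (PySem.Chars.find s [c]).toNat p with h | h | h
    · exact absurd hpre (hmin _ h)
    · exact h
    · exact absurd ((singleton_prefix_drop c s p).mpr hp) (hlt p h)
  omega

theorem mem_TS_iff (c : Char) : c ∈ TS ↔ pvIsTerm c = true := by
  simp [TS, pvIsTerm, beq_iff_eq]
  tauto

theorem hitsOf_nil (s : List Char) (h : ∀ c ∈ s, pvIsTerm c = false) : hitsOf s = [] := by
  unfold hitsOf
  rw [List.filter_eq_nil_iff]
  intro x hx
  obtain ⟨c, hcTS, rfl⟩ := List.mem_map.mp hx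
  have hns : c ∉ s := fun hmem => by
    have := h c hmem
    rw [(mem_TS_iff c).mp hcTS] at this
    exact Bool.true_eq_false.mp this
  simp [find_not_mem s c hns]

theorem min?_hitsOf (s : List Char) (p : Nat) (h : FirstTermAt s p) :
    PySem.List.min? (hitsOf s) (fun x => x) = some ((p : Nat) : Int) := by
  obtain ⟨⟨c0, hc0, ht0⟩, hmin⟩ := h
  have hfind : PySem.Chars.find s [c0] = (p : Int) := by
    apply find_first s c0 p hc0
    intro j hj hcj
    have := hmin j hj c0 hcj
    rw [ht0] at this
    exact Bool.true_eq_false.mp this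
  have hmem : ((p : Nat) : Int) ∈ hitsOf s := by
    refine List.mem_filter.mpr ⟨List.mem_map.mpr ⟨c0, (mem_TS_iff c0).mpr ht0, hfind⟩, ?_⟩
    simp
  have hlb : ∀ y ∈ hitsOf s, ((p : Nat) : Int) ≤ y := by
    intro y hy
    obtain ⟨hy1, hy2⟩ := List.mem_filter.mp hy
    obtain ⟨c, hcTS, rfl⟩ := List.mem_map.mp hy1
    have hne : PySem.Chars.find s [c] ≠ -1 := by simpa using hy2
    have h0 : 0 ≤ PySem.Chars.find s [c] := by
      have := PySem.Chars.neg_one_le_find s [c]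
      omega
    obtain ⟨hpre, _⟩ := PySem.Chars.find_spec h0
    rw [singleton_prefix_drop] at hpre
    by_contra hlt
    have hltn : (PySem.Chars.find s [c]).toNat < p := by omega
    have := hmin _ hltn c hpre
    rw [(mem_TS_iff c).mp hcTS] at this
    exact Bool.true_eq_false.mp this
  cases hq : PySem.List.min? (hitsOf s) (fun x => x) with
  | none =>
    rw [PySem.List.min?_eq_none_iff] at hq
    rw [hq] at hmem
    simp at hmem
  | some m =>
    have hm := PySem.List.min?_mem hq
    have h1 := PySem.List.min?_isMin hq _ hmem
    have h2 := hlb m hm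
    simp only [Option.some_inj]
    omega

theorem loop_term (offset start length : Int) (source : String) (p : Nat) (c : Char)
    (hplen : (p : Int) < length)
    (hc : source.toList[p]? = some c) (hterm : pvIsTerm c = true)
    (hCR : c = '\r' → p + 1 < source.toList.length) :
    ∀ n j, j ≤ p → p - j = n →
      (∀ k, j ≤ k → k < p → ∀ d, source.toList[k]? = some d → pvIsTerm d = false) →
      skipSingleLineCommentLoop offset start length source (j : Int) =
        some [("type", "Line"), ("value", PySem.Str.slice source (some (start + offset))
          (some (if source.toList[p]? = some '\r' ∧ source.toList[p + 1]? = some '\n'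
                 then ((p : Int)) + 1 else (p : Int))))] := by
  intro n
  induction n with
  | zero =>
    intro j hj hn _hclean
    have hjp : j = p := by omega
    subst hjp
    have hcond : (j : Int) < length := hplen
    rw [skipSingleLineCommentLoop, dif_pos hcond]
    have hget : PySem.Str.pyGet? source (j : Int) = some c := by simpa using hc
    rw [hget]
    simp only []
    rw [pv_isTerm_bridge c, hterm]
    simp only [if_true]
    by_cases h13 : c = '\r'
    · have hb13 : ((c.toNat : Int) == 13) = true := by subst h13; decide
      rw [hb13]
      simp only [if_true]
      have hlt : j + 1 < source.toList.length := hCR h13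
      obtain ⟨c2, hc2⟩ : ∃ c2, source.toList[j + 1]? = some c2 :=
        ⟨source.toList[j + 1], List.getElem?_eq_getElem hlt⟩
      have hget2 : PySem.Str.pyGet? source ((j : Int) + 1) = some c2 := by
        rw [show ((j : Int) + 1) = ((j + 1 : Nat) : Int) by omega, PySem.Str.pyGet?_natCast]
        exact hc2
      rw [hget2]
      simp only []
      by_cases h10 : c2 = '\n'
      · have hb10 : ((c2.toNat : Int) == 10) = true := by subst h10; decide
        rw [hb10]
        simp only [if_true]
        have hcnd : (source.toList[j]? = some '\r' ∧ source.toList[j + 1]? = some '\n') := by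
          constructor
          · rw [hc, h13]
          · rw [hc2, h10]
        rw [if_pos hcnd]
        norm_num
      · have hb10 : ((c2.toNat : Int) == 10) = false := by
          simp [char_eq_iff_toNat] at h10 ⊢
          omega
        rw [hb10]
        simp only [Bool.false_eq_true, if_false]
        have hcnd : ¬(source.toList[j]? = some '\r' ∧ source.toList[j + 1]? = some '\n') := by
          rintro ⟨-, h2⟩
          rw [hc2] at h2
          exact h10 (by injection h2)
        rw [if_neg hcnd]
        norm_num
    · have hb13 : ((c.toNat : Int) == 13) = false := by
        simp [char_eq_iff_toNat] at h13 ⊢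
        omega
      rw [hb13]
      simp only [Bool.false_eq_true, if_false]
      have hcnd : ¬(source.toList[j]? = some '\r' ∧ source.toList[j + 1]? = some '\n') := by
        rintro ⟨h1, -⟩
        rw [hc] at h1
        exact h13 (by injection h1)
      rw [if_neg hcnd]
      norm_num
  | succ n ih =>
    intro j hj hn hclean
    have hjp : j < p := by omega
    have hcond : (j : Int) < length := by
      have : (j : Int) < (p : Int) := by exact_mod_cast hjp
      omega
    have hjlen : j < source.toList.length := by
      have hlt : p < source.toList.length := (List.getElem?_eq_some_iff.mp hc).1
      omega
    obtain ⟨d, hd⟩ : ∃ d, source.toList[j]? = some d :=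
      ⟨source.toList[j], List.getElem?_eq_getElem hjlen⟩
    have hget : PySem.Str.pyGet? source (j : Int) = some d := by simpa using hd
    rw [skipSingleLineCommentLoop, dif_pos hcond, hget]
    simp only []
    rw [pv_isTerm_bridge d, hclean j le_rfl hjp d hd]
    simp only [Bool.false_eq_true, if_false]
    have hcast : ((j : Int) + 1) = ((j + 1 : Nat) : Int) := by omega
    rw [hcast]
    exact ih (j + 1) (by omega) (by omega) (fun k hk1 hk2 => hclean k (by omega) hk2)

theorem loop_none (offset start length : Int) (source : String)
    (hlen : length ≤ (source.toList.length : Int)) :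
    ∀ n (j : Nat), (length - (j : Int)).toNat = n →
      (∀ k : Nat, j ≤ k → (k : Int) < length → ∀ d, source.toList[k]? = some d → pvIsTerm d = false) →
      skipSingleLineCommentLoop offset start length source (j : Int) = none := by
  intro n
  induction n with
  | zero =>
    intro j hn _hclean
    have hcond : ¬((j : Int) < length) := by omega
    rw [skipSingleLineCommentLoop, dif_neg hcond]
  | succ n ih =>
    intro j hn hclean
    have hcond : (j : Int) < length := by omega
    have hjlen : j < source.toList.length := by omega
    obtain ⟨d, hd⟩ : ∃ d, source.toList[j]? = some d :=
      ⟨source.toList[j], List.getElem?_eq_getElem hjlen⟩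
    have hget : PySem.Str.pyGet? source (j : Int) = some d := by simpa using hd
    rw [skipSingleLineCommentLoop, dif_pos hcond, hget]
    simp only []
    rw [pv_isTerm_bridge d, hclean j le_rfl hcond d hd]
    simp only [Bool.false_eq_true, if_false]
    have hcast : ((j : Int) + 1) = ((j + 1 : Nat) : Int) := by omega
    rw [hcast]
    exact ih (j + 1) (by omega) (fun k hk1 hk2 => hclean k (by omega) hk2)

theorem hits_bridge (seg : String) :
    (LINE_TERMINATOR_CHARS.map (fun t => PySem.Str.find seg t)).filter (fun p => p ≠ -1) = hitsOf seg.toList := by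
  have e1 : "\n".toList = ['\n'] := by decide
  have e2 : "\r".toList = ['\r'] := by decide
  have e3 : "\u2028".toList = ['\u2028'] := by decide
  have e4 : "\u2029".toList = ['\u2029'] := by decide
  simp [LINE_TERMINATOR_CHARS, hitsOf, TS, e1, e2, e3, e4]

theorem seg_getElem? (cs : List Char) (i m bound : Nat) (hm : m < bound - i) :
    ((cs.drop i).take (bound - i))[m]? = cs[i + m]? := by
  rw [List.getElem?_take_of_lt hm, List.getElem?_drop]

theorem seg_mem (cs : List Char) (i bound : Nat) (c' : Char)
    (h : c' ∈ (cs.drop i).take (bound - i)) : ∃ m, m < bound - i ∧ cs[i + m]? = some c' := by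
  obtain ⟨m, hm⟩ := List.mem_iff_getElem?.mp h
  have hlt : m < bound - i := by
    have := (List.getElem?_eq_some_iff.mp hm).1
    have h2 := List.length_take_le (bound - i) (cs.drop i)
    omega
  exact ⟨m, hlt, by rw [← seg_getElem? cs i m bound hlt]; exact hm⟩

theorem skipSingleLineComment_spec : Claim_equal_skipSingleLineComment := by
  intro offset index length source _hdom hpre
  unfold Spec_skipSingleLineComment
  rcases hpre with ⟨hle, hclamp⟩ | ⟨hidx, hlt, hcr1, hcr2⟩
  · -- no-scan case: A exits immediately, B's slice is empty
    have hA : skipSingleLineComment offset index length source = none := by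
      unfold skipSingleLineComment
      rw [skipSingleLineCommentLoop, dif_neg (by omega)]
    have hseg : (PySem.Str.slice source (some index) (some length)).toList = [] := by
      simp only [PySem.Str.toList_slice, PySem.Chars.slice_eq_listSlice]
      apply List.eq_nil_iff_length_eq_zero.mpr
      rw [PySem.List.length_slice]
      omega
    have hB : skipSingleLineComment_alt offset index length source = none := by
      unfold skipSingleLineComment_alt
      simp only []
      rw [hits_bridge, hseg, hitsOf_nil [] (by intro c hc; simp at hc)]
      rfl
    rw [hA, hB]
  · -- scan case
    set cs := source.toList with hcs
    set n := cs.length with hn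
    set i := index.toNat with hi
    have hidx' : index = (i : Int) := by omega
    have hP : DecidablePred (fun k => i ≤ k ∧ ((k : Int) < length) ∧
        ∃ c, cs[k]? = some c ∧ pvIsTerm c = true) := by infer_instance
    by_cases hex : ∃ k, i ≤ k ∧ ((k : Int) < length) ∧ ∃ c, cs[k]? = some c ∧ pvIsTerm c = true
    · -- a terminator is reached: both return the same comment dict
      set p := Nat.find hex with hp
      obtain ⟨hip, hplen, c, hc, hterm⟩ := Nat.find_spec hex
      have hpn : p < n := (List.getElem?_eq_some_iff.mp hc).1
      have hclean : ∀ k, i ≤ k → k < p → ∀ d, cs[k]? = some d → pvIsTerm d = false := by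
        intro k hk1 hk2 d hd
        by_contra hbad
        have hbad' : pvIsTerm d = true := by
          cases hv : pvIsTerm d
          · exact absurd hv hbad
          · rfl
        exact Nat.find_min hex hk2 ⟨hk1, by omega, d, hd, hbad'⟩
      have hCR : c = '\r' → p + 1 < n := by
        intro hcr
        by_contra hge
        have hpn1 : p = n - 1 := by omega
        apply hcr2
        refine ⟨by omega, ?_, ?_⟩
        · rw [List.getLast?_eq_getElem?, ← hn, ← hpn1, hc, hcr]
        · intro c' hc'
          rw [List.drop_take] at hc'
          obtain ⟨m, hm, hcm⟩ := seg_mem cs i (n - 1) c' hc'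
          exact hclean (i + m) (by omega) (by omega) c' hcm
      have hA : skipSingleLineComment offset index length source =
          some [("type", "Line"), ("value", PySem.Str.slice source (some index)
            (some (if cs[p]? = some '\r' ∧ cs[p + 1]? = some '\n'
                   then ((p : Int)) + 1 else (p : Int))))] := by
        unfold skipSingleLineComment
        show skipSingleLineCommentLoop offset (index - offset) length source index = _
        rw [hidx']
        rw [loop_term offset ((i : Int) - offset) length source p c hplen hc hterm hCR (p - i) i hip rfl hclean]
        rw [show ((i : Int)) - offset + offset = ((i : Int)) from by ring]
      have hlen0 : 0 ≤ length := by omega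
      have hseg : (PySem.Str.slice source (some index) (some length)).toList =
          (cs.drop i).take (length.toNat - i) := by
        simp only [PySem.Str.toList_slice, PySem.Chars.slice_eq_listSlice]
        rw [hidx', PySem.List.slice_toNat source.toList (a := (i : Int)) (b := length) (by omega) hlen0]
        congr 1
      have hft : FirstTermAt ((cs.drop i).take (length.toNat - i)) (p - i) := by
        constructor
        · refine ⟨c, ?_, hterm⟩
          rw [seg_getElem? cs i (p - i) length.toNat (by omega), show i + (p - i) = p from by omega]
          exact hc
        · intro j hj d hd
          rw [seg_getElem? cs i j length.toNat (by omega)] at hd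
          exact hclean (i + j) (by omega) (by omega) d hd
      have hB : skipSingleLineComment_alt offset index length source =
          some [("type", "Line"), ("value", PySem.Str.slice source (some index)
            (some (if cs[p]? = some '\r' ∧ cs[p + 1]? = some '\n'
                   then ((p : Int)) + 1 else (p : Int))))] := by
        unfold skipSingleLineComment_alt
        simp only []
        rw [hits_bridge, hseg, min?_hitsOf _ _ hft]
        simp only []
        have hpos : index + ((p - i : Nat) : Int) = (p : Int) := by omega
        rw [hpos]
        have hg1 : PySem.Str.pyGet? source ((p : Nat) : Int) = cs[p]? := by simp [hcs]
        have hg2 : PySem.Str.pyGet? source (((p : Nat) : Int) + 1) = cs[p + 1]? := by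
          rw [show PySem.Str.pyGet? source (((p : Nat) : Int) + 1) = PySem.List.pyGet? source.toList (((p : Nat) : Int) + 1) from by simp,
            PySem.List.pyGet?_of_nonneg source.toList (by omega),
            show (((p : Nat) : Int) + 1).toNat = p + 1 from by omega, hcs]
        have hlenS : PySem.Str.len source = ((n : Nat) : Int) := by simp [hn, hcs]
        simp only [hg1, hg2, hlenS]
        by_cases hr : cs[p]? = some '\r'
        · have hcr' : c = '\r' := by
            rw [hc] at hr
            injection hr
          have hlt2 : ((p : Int)) + 1 < ((n : Nat) : Int) := by
            have := hCR hcr'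
            omega
          by_cases hn2 : cs[p + 1]? = some '\n'
          · simp [hr, hn2, hlt2]
          · simp [hr, hn2, hlt2]
        · simp [hr]
      rw [hA, hB]
    · -- no terminator in range: both return none
      have hclean : ∀ k : Nat, i ≤ k → (k : Int) < length → ∀ d, cs[k]? = some d → pvIsTerm d = false := by
        intro k hk1 hk2 d hd
        cases hv : pvIsTerm d
        · rfl
        · exact absurd ⟨hk1, hk2, d, hd, hv⟩ (not_exists.mp hex k)
      have hlen_le : length ≤ (n : Int) := by
        by_contra hgt
        apply hcr1
        refine ⟨by omega, ?_⟩
        intro c' hc'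
        obtain ⟨m, hm⟩ := List.mem_iff_getElem?.mp hc'
        rw [List.getElem?_drop] at hm
        have hmn : i + m < n := (List.getElem?_eq_some_iff.mp hm).1
        exact hclean (i + m) (by omega) (by omega) c' hm
      have hA : skipSingleLineComment offset index length source = none := by
        unfold skipSingleLineComment
        show skipSingleLineCommentLoop offset (index - offset) length source index = _
        rw [hidx']
        exact loop_none offset ((i : Int) - offset) length source hlen_le (length - (i : Int)).toNat i rfl hclean
      have hB : skipSingleLineComment_alt offset index length source = none := by
        unfold skipSingleLineComment_alt
        simp only []
        have hseg : (PySem.Str.slice source (some index) (some length)).toList =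
            (cs.drop i).take (length.toNat - i) := by
          simp only [PySem.Str.toList_slice, PySem.Chars.slice_eq_listSlice]
          rw [hidx', PySem.List.slice_toNat source.toList (a := (i : Int)) (b := length) (by omega) (by omega)]
          congr 1
        rw [hits_bridge, hseg, hitsOf_nil _ ?_]
        · rfl
        · intro c' hc'
          obtain ⟨m, hm, hcm⟩ := seg_mem cs i length.toNat c' hc'
          exact hclean (i + m) (by omega) (by omega) c' hcm
      rw [hA, hB]
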